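-- pv_equiv track=rewrite | github.com/simsong/mailtools | macos_addressbook_extract.py | best_email
-- ===== SOURCE A (Python) =====
-- def best_email(emails):
--     # Simple rules-based approach for finding the best email
--     for email in emails:
--         if "gmail" in email:
--             return email
--     for email in emails:
--         if ".edu" in email:
--             return email
--     shortest = min( len(email) for email in emails)
--     for email in emails:
--         if len(email) == shortest:
--             return email
-- ===== SOURCE B (Python) =====
-- def best_email(emails):
--     # One pass: gmail short-circuits; remember first .edu and first shortest.
--     first_edu = None
--     shortest = None
--     for email in emails:
--         if "gmail" in email:
--             return email
--         if first_edu is None and ".edu" in email: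
--             first_edu = email
--         if shortest is None or len(email) < len(shortest):
--             shortest = email
--     if first_edu is not None:
--         return first_edu
--     if shortest is not None:
--         return shortest
--     raise ValueError("best_email() arg is an empty sequence")
-- ===== Notes on version B (the rewrite author's own statement) =====
-- stated objective: alternative
-- what changed: Replaced A's three separate scans plus a min-then-rescan with a single pass that short-circuits on gmail and accumulates the first .edu match and the first shortest element.
import Mathlib
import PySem

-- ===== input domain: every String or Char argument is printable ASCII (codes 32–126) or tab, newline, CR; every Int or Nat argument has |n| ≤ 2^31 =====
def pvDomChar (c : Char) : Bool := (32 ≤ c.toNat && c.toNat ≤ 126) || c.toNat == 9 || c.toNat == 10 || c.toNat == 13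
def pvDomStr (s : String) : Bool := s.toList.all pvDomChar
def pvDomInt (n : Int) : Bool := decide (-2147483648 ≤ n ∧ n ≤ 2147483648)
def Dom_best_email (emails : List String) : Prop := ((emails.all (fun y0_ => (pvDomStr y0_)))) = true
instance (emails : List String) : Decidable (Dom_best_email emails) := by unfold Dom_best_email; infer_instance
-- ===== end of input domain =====

-- B changes only the traversal (one accumulating pass instead of four scans); same value everywhere A returns.
-- ===== PORT A =====
def best_email (emails : List String) : String :=
  match emails.find? (fun e => PySem.Str.isIn "gmail" e) with
  | some e => e
  | none =>
    match emails.find? (fun e => PySem.Str.isIn ".edu" e) with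
    | some e => e
    | none =>
      match PySem.List.min? (emails.map (fun e => PySem.Str.len e)) (fun x => x) with
      | none => ""   -- min() raises ValueError on the empty list; excluded by Pre_
      | some shortest =>
        match emails.find? (fun e => PySem.Str.len e == shortest) with
        | some e => e
        | none => ""  -- unreachable: some element attains the minimum

-- ===== PORT B =====
def bestLoop (l : List String) (firstEdu shortest : Option String) : String :=
  match l with
  | [] =>
    match firstEdu with
    | some e => e
    | none =>
      match shortest with
      | some e => e
      | none => ""   -- raise ValueError; excluded by Pre_
  | e :: rest =>
    if PySem.Str.isIn "gmail" e then e
    else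
      bestLoop rest
        (if firstEdu.isNone && PySem.Str.isIn ".edu" e then some e else firstEdu)
        (match shortest with
         | none => some e
         | some s => if PySem.Str.len e < PySem.Str.len s then some e else some s)

def best_email_alt (emails : List String) : String := bestLoop emails none none

-- ===== PRECONDITION & SPEC =====
-- Pre_ excludes only the empty list, on which A's min() raises ValueError (B also raises ValueError there).
def Pre_best_email (emails : List String) : Prop := emails ≠ []
instance (emails : List String) : Decidable (Pre_best_email emails) := by unfold Pre_best_email; infer_instance
def pvWitness_best_email : List String := ["a@b.co"]
def Spec_best_email (emails : List String) (out : String) : Prop := out = best_email_alt emails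
instance (emails : List String) (out : String) : Decidable (Spec_best_email emails out) := by unfold Spec_best_email; infer_instance

-- ===== CLAIM (what is proved, stated in full; the proofs are below) =====
def Claim_equal_best_email : Prop := ∀ (emails : List String), Dom_best_email emails → Pre_best_email emails → Spec_best_email emails (best_email emails)

-- ===== LEMMAS AND PROOFS =====

-- first element of minimal length among s :: l (ties to the earliest)
def firstMin (s : String) (l : List String) : String :=
  match l with
  | [] => s
  | e :: r => if PySem.Str.len e < PySem.Str.len s then firstMin e r else firstMin s r

-- B's final "shortest" answer given the accumulator and the remaining list
def shRes (sh : Option String) (l : List String) : String :=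
  match sh, l with
  | some s, _ => firstMin s l
  | none, [] => ""
  | none, e :: r => firstMin e r

theorem bestLoop_eq (l : List String) (fe sh : Option String) :
    bestLoop l fe sh =
      match l.find? (fun e => PySem.Str.isIn "gmail" e) with
      | some e => e
      | none =>
        match fe with
        | some e => e
        | none =>
          match l.find? (fun e => PySem.Str.isIn ".edu" e) with
          | some e => e
          | none => shRes sh l := by
  induction l generalizing fe sh with
  | nil => cases fe <;> cases sh <;> simp [bestLoop, shRes, firstMin]
  | cons x r ih =>
    simp only [bestLoop]
    by_cases hg : PySem.Str.isIn "gmail" x = true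
    · rw [if_pos hg, List.find?_cons_of_pos hg]
    · rw [if_neg hg, ih, List.find?_cons_of_neg hg]
      cases hfg : r.find? (fun e => PySem.Str.isIn "gmail" e) with
      | some e => rfl
      | none =>
        cases fe with
        | some e => simp
        | none =>
          by_cases he : PySem.Str.isIn ".edu" x = true
          · rw [List.find?_cons_of_pos he]
            have hc : (Option.isNone (none : Option String) && PySem.Str.isIn ".edu" x) = true := by
              rw [he]; rfl
            rw [if_pos hc]
          · rw [List.find?_cons_of_neg he]
            simp only [Option.isNone_none, Bool.true_and, he, if_false]
            cases hfe : r.find? (fun e => PySem.Str.isIn ".edu" e) with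
            | some e => rfl
            | none =>
              cases sh with
              | none => rfl
              | some s =>
                show shRes (if PySem.Str.len x < PySem.Str.len s then some x else some s) r
                    = shRes (some s) (x :: r)
                by_cases hlt : PySem.Str.len x < PySem.Str.len s
                · rw [if_pos hlt]; simp only [shRes, firstMin]; rw [if_pos hlt]
                · rw [if_neg hlt]; simp only [shRes, firstMin]; rw [if_neg hlt]

theorem foldl_min_le (l : List Int) (a : Int) : l.foldl min a ≤ a := by
  induction l generalizing a with
  | nil => simp
  | cons x r ih => exact le_trans (ih (min a x)) (min_le_left a x)

theorem find_min (rest : List String) (e : String) :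
    List.find? (fun x => PySem.Str.len x == (rest.map (fun e => PySem.Str.len e)).foldl min (PySem.Str.len e)) (e :: rest)
      = some (firstMin e rest) := by
  induction rest generalizing e with
  | nil => simp [firstMin]
  | cons y r ih =>
    by_cases hlt : PySem.Str.len y < PySem.Str.len e
    · have hmin : min (PySem.Str.len e) (PySem.Str.len y) = PySem.Str.len y := by omega
      have hM : (List.map (fun e => PySem.Str.len e) (y :: r)).foldl min (PySem.Str.len e)
          = (List.map (fun e => PySem.Str.len e) r).foldl min (PySem.Str.len y) := by
        simp only [List.map_cons, List.foldl_cons]; rw [hmin]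
      have hle : (List.map (fun e => PySem.Str.len e) r).foldl min (PySem.Str.len y) ≤ PySem.Str.len y :=
        foldl_min_le _ _
      have hfm : firstMin e (y :: r) = firstMin y r := by
        simp only [firstMin]; rw [if_pos hlt]
      rw [hM, hfm, List.find?_cons_of_neg (by simp only [beq_iff_eq]; omega)]
      exact ih y
    · have hmin : min (PySem.Str.len e) (PySem.Str.len y) = PySem.Str.len e := by omega
      have hM : (List.map (fun e => PySem.Str.len e) (y :: r)).foldl min (PySem.Str.len e)
          = (List.map (fun e => PySem.Str.len e) r).foldl min (PySem.Str.len e) := by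
        simp only [List.map_cons, List.foldl_cons]; rw [hmin]
      have hfm : firstMin e (y :: r) = firstMin e r := by
        simp only [firstMin]; rw [if_neg hlt]
      have ihe := ih e
      rw [hM, hfm]
      by_cases heq : PySem.Str.len e = (List.map (fun e => PySem.Str.len e) r).foldl min (PySem.Str.len e)
      · rw [List.find?_cons_of_pos (by simp only [beq_iff_eq]; omega)]
        rw [List.find?_cons_of_pos (by simp only [beq_iff_eq]; omega)] at ihe
        exact ihe
      · have hle : (List.map (fun e => PySem.Str.len e) r).foldl min (PySem.Str.len e) ≤ PySem.Str.len e :=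
          foldl_min_le _ _
        rw [List.find?_cons_of_neg (by simp only [beq_iff_eq]; omega),
            List.find?_cons_of_neg (by simp only [beq_iff_eq]; omega)]
        rw [List.find?_cons_of_neg (by simp only [beq_iff_eq]; omega)] at ihe
        exact ihe

-- ===== VERDICT (by name: the statement is the Claim_ definition above) =====
theorem best_email_spec : Claim_equal_best_email := by
  intro emails _ hpre
  unfold Spec_best_email best_email best_email_alt
  rw [bestLoop_eq]
  match emails, hpre with
  | e :: rest, _ =>
    cases hg : (e :: rest).find? (fun e => PySem.Str.isIn "gmail" e) with
    | some x => rfl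
    | none =>
      cases he : (e :: rest).find? (fun e => PySem.Str.isIn ".edu" e) with
      | some x => rfl
      | none =>
        simp only [List.map_cons, PySem.List.min?_id_cons, find_min, shRes]
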